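-- pv_equiv track=rewrite | github.com/Utah-MMC/icon | scraper/nextdoor_scraper.py | analyze_nextdoor_project
-- ===== SOURCE A (Python) =====
-- def analyze_nextdoor_project(text):
--     """Analyze Nextdoor post to determine project type and value"""
--     text_lower = text.lower()
--
--     # Project type analysis
--     if any(word in text_lower for word in ['dumpster', 'waste removal', 'debris', 'roll off']):
--         project_type = 'Waste Removal Project'
--         estimated_value = 2000
--     elif any(word in text_lower for word in ['demolition', 'tear down', 'remove', 'cleanout']):
--         project_type = 'Demolition Project'
--         estimated_value = 25000
--     elif any(word in text_lower for word in ['renovation', 'remodel', 'renovate']):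
--         project_type = 'Renovation Project'
--         estimated_value = 35000
--     elif any(word in text_lower for word in ['construction', 'build', 'new construction']):
--         project_type = 'Construction Project'
--         estimated_value = 50000
--     elif any(word in text_lower for word in ['roofing', 'roof', 'shingle', 'roof tear-off']):
--         project_type = 'Roofing Project'
--         estimated_value = 15000
--     elif any(word in text_lower for word in ['landscaping', 'landscape', 'yard']):
--         project_type = 'Landscaping Project'
--         estimated_value = 12000
--     elif any(word in text_lower for word in ['concrete', 'driveway', 'patio', 'concrete removal']):
--         project_type = 'Concrete Project'
--         estimated_value = 18000
--     elif any(word in text_lower for word in ['junk removal', 'haul away']):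
--         project_type = 'Junk Removal Project'
--         estimated_value = 1500
--     else:
--         project_type = 'General Construction'
--         estimated_value = 20000
--
--     return project_type, estimated_value
-- ===== SOURCE B (Python) =====
-- # B: flat keyword -> (priority, type, value) map, scanned exhaustively keeping
-- # the minimum-priority match (no rule groups, no short-circuit branch order).
-- KEYWORD_INFO = {
--     'dumpster': (0, 'Waste Removal Project', 2000),
--     'waste removal': (0, 'Waste Removal Project', 2000),
--     'debris': (0, 'Waste Removal Project', 2000),
--     'roll off': (0, 'Waste Removal Project', 2000),
--     'demolition': (1, 'Demolition Project', 25000),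
--     'tear down': (1, 'Demolition Project', 25000),
--     'remove': (1, 'Demolition Project', 25000),
--     'cleanout': (1, 'Demolition Project', 25000),
--     'renovation': (2, 'Renovation Project', 35000),
--     'remodel': (2, 'Renovation Project', 35000),
--     'renovate': (2, 'Renovation Project', 35000),
--     'construction': (3, 'Construction Project', 50000),
--     'build': (3, 'Construction Project', 50000),
--     'new construction': (3, 'Construction Project', 50000),
--     'roofing': (4, 'Roofing Project', 15000),
--     'roof': (4, 'Roofing Project', 15000),
--     'shingle': (4, 'Roofing Project', 15000),
--     'roof tear-off': (4, 'Roofing Project', 15000),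
--     'landscaping': (5, 'Landscaping Project', 12000),
--     'landscape': (5, 'Landscaping Project', 12000),
--     'yard': (5, 'Landscaping Project', 12000),
--     'concrete': (6, 'Concrete Project', 18000),
--     'driveway': (6, 'Concrete Project', 18000),
--     'patio': (6, 'Concrete Project', 18000),
--     'concrete removal': (6, 'Concrete Project', 18000),
--     'junk removal': (7, 'Junk Removal Project', 1500),
--     'haul away': (7, 'Junk Removal Project', 1500),
-- }
--
-- def analyze_nextdoor_project(text):
--     t = text.lower()
--     best = None
--     for kw, info in KEYWORD_INFO.items():
--         if kw in t and (best is None or info[0] < best[0]):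
--             best = info
--     if best is None:
--         return 'General Construction', 20000
--     return best[1], best[2]
-- ===== Notes on version B (the rewrite author's own statement) =====
-- stated objective: alternative
-- what changed: Replaces the ordered if/elif over keyword groups (short-circuiting on the first matching group) with a flat keyword->(priority,type,value) map scanned exhaustively, keeping the match of minimum priority.
import Mathlib
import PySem

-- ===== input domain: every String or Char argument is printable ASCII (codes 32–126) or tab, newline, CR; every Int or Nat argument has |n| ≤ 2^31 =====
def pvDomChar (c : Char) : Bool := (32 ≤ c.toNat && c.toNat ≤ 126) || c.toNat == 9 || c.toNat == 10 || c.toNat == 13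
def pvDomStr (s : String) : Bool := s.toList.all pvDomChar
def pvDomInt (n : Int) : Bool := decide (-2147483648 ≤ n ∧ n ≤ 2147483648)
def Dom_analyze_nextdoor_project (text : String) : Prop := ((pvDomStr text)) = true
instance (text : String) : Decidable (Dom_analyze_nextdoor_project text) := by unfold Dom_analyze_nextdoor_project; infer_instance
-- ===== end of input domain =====

-- B replaces the ordered if/elif over keyword groups with a flat keyword->(priority,type,value)
-- map scanned exhaustively, keeping the minimum-priority match (objective: alternative).

-- ===== PORT A =====
def analyze_nextdoor_project (text : String) : String × Int :=
  let text_lower := PySem.Str.lower text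
  if ["dumpster", "waste removal", "debris", "roll off"].any (fun word => PySem.Str.isIn word text_lower) then
    ("Waste Removal Project", 2000)
  else if ["demolition", "tear down", "remove", "cleanout"].any (fun word => PySem.Str.isIn word text_lower) then
    ("Demolition Project", 25000)
  else if ["renovation", "remodel", "renovate"].any (fun word => PySem.Str.isIn word text_lower) then
    ("Renovation Project", 35000)
  else if ["construction", "build", "new construction"].any (fun word => PySem.Str.isIn word text_lower) then
    ("Construction Project", 50000)
  else if ["roofing", "roof", "shingle", "roof tear-off"].any (fun word => PySem.Str.isIn word text_lower) then
    ("Roofing Project", 15000)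
  else if ["landscaping", "landscape", "yard"].any (fun word => PySem.Str.isIn word text_lower) then
    ("Landscaping Project", 12000)
  else if ["concrete", "driveway", "patio", "concrete removal"].any (fun word => PySem.Str.isIn word text_lower) then
    ("Concrete Project", 18000)
  else if ["junk removal", "haul away"].any (fun word => PySem.Str.isIn word text_lower) then
    ("Junk Removal Project", 1500)
  else
    ("General Construction", 20000)

-- ===== PORT B =====
-- flat keyword -> (priority, project_type, value) map (dict -> assoc list, insertion order)
def pvKeywordInfo : List (String × Int × String × Int) :=
  [ ("dumpster", 0, "Waste Removal Project", 2000),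
    ("waste removal", 0, "Waste Removal Project", 2000),
    ("debris", 0, "Waste Removal Project", 2000),
    ("roll off", 0, "Waste Removal Project", 2000),
    ("demolition", 1, "Demolition Project", 25000),
    ("tear down", 1, "Demolition Project", 25000),
    ("remove", 1, "Demolition Project", 25000),
    ("cleanout", 1, "Demolition Project", 25000),
    ("renovation", 2, "Renovation Project", 35000),
    ("remodel", 2, "Renovation Project", 35000),
    ("renovate", 2, "Renovation Project", 35000),
    ("construction", 3, "Construction Project", 50000),
    ("build", 3, "Construction Project", 50000),
    ("new construction", 3, "Construction Project", 50000),
    ("roofing", 4, "Roofing Project", 15000),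
    ("roof", 4, "Roofing Project", 15000),
    ("shingle", 4, "Roofing Project", 15000),
    ("roof tear-off", 4, "Roofing Project", 15000),
    ("landscaping", 5, "Landscaping Project", 12000),
    ("landscape", 5, "Landscaping Project", 12000),
    ("yard", 5, "Landscaping Project", 12000),
    ("concrete", 6, "Concrete Project", 18000),
    ("driveway", 6, "Concrete Project", 18000),
    ("patio", 6, "Concrete Project", 18000),
    ("concrete removal", 6, "Concrete Project", 18000),
    ("junk removal", 7, "Junk Removal Project", 1500),
    ("haul away", 7, "Junk Removal Project", 1500) ]

-- one step of Source B's loop: keep `best` unless kw matches and has strictly smaller priority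
def pvStep (t : String) (best : Option (Int × String × Int)) (e : String × Int × String × Int) :
    Option (Int × String × Int) :=
  if PySem.Str.isIn e.1 t && (match best with | none => true | some b => decide (e.2.1 < b.1)) then
    some e.2
  else best

def analyze_nextdoor_project_alt (text : String) : String × Int :=
  let t := PySem.Str.lower text
  match pvKeywordInfo.foldl (pvStep t) none with
  | none => ("General Construction", 20000)
  | some (_, pt, v) => (pt, v)

-- ===== PRECONDITION & SPEC =====
def Spec_analyze_nextdoor_project (text : String) (out : String × Int) : Prop :=
  out = analyze_nextdoor_project_alt text
instance (text : String) (out : String × Int) : Decidable (Spec_analyze_nextdoor_project text out) := by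
  unfold Spec_analyze_nextdoor_project; infer_instance

-- ===== CLAIM =====
def Claim_equal_analyze_nextdoor_project : Prop :=
  ∀ (text : String), Dom_analyze_nextdoor_project text →
    Spec_analyze_nextdoor_project text (analyze_nextdoor_project text)

-- ===== LEMMAS AND PROOFS =====

-- proof-side grouped view of the rules (A's branch order)
def pvGroups : List (List String × String × Int) :=
  [ (["dumpster", "waste removal", "debris", "roll off"], "Waste Removal Project", 2000),
    (["demolition", "tear down", "remove", "cleanout"], "Demolition Project", 25000),
    (["renovation", "remodel", "renovate"], "Renovation Project", 35000),
    (["construction", "build", "new construction"], "Construction Project", 50000),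
    (["roofing", "roof", "shingle", "roof tear-off"], "Roofing Project", 15000),
    (["landscaping", "landscape", "yard"], "Landscaping Project", 12000),
    (["concrete", "driveway", "patio", "concrete removal"], "Concrete Project", 18000),
    (["junk removal", "haul away"], "Junk Removal Project", 1500) ]

def pvChainOf (t : String) : List (List String × String × Int) → String × Int
  | [] => ("General Construction", 20000)
  | (kws, pt, v) :: rest =>
      if kws.any (fun word => PySem.Str.isIn word t) then (pt, v) else pvChainOf t rest

def pvFlatOf (i : Int) : List (List String × String × Int) → List (String × Int × String × Int)
  | [] => []
  | (kws, pt, v) :: rest => kws.map (fun kw => (kw, i, pt, v)) ++ pvFlatOf (i + 1) rest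

theorem pvFlat_eq : pvKeywordInfo = pvFlatOf 0 pvGroups := by decide

theorem pvRanks_ge : ∀ (rules : List (List String × String × Int)) (i : Int)
    (e : String × Int × String × Int), e ∈ pvFlatOf i rules → i ≤ e.2.1 := by
  intro rules
  induction rules with
  | nil => intro i e h; simp [pvFlatOf] at h
  | cons r rest ih =>
    intro i e h
    obtain ⟨kws, pt, v⟩ := r
    simp only [pvFlatOf, List.mem_append, List.mem_map] at h
    rcases h with ⟨kw, _, rfl⟩ | h
    · simp
    · have := ih (i + 1) e h; omega

theorem pvAbsorb (t : String) (l : List (String × Int × String × Int)) (b : Int × String × Int)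
    (h : ∀ e ∈ l, b.1 ≤ e.2.1) : l.foldl (pvStep t) (some b) = some b := by
  induction l with
  | nil => rfl
  | cons e rest ih =>
    have hb : ¬ e.2.1 < b.1 := not_lt.mpr (h e (by simp))
    simp only [List.foldl_cons, pvStep, hb, decide_false, Bool.and_false]
    exact ih (fun e' he' => h e' (by simp [he']))

theorem pvGroupFold (t : String) (kws : List String) (i : Int) (pt : String) (v : Int) :
    (kws.map (fun kw => (kw, i, pt, v))).foldl (pvStep t) none =
      (if kws.any (fun word => PySem.Str.isIn word t) then some (i, pt, v) else none) := by
  induction kws with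
  | nil => rfl
  | cons kw rest ih =>
    simp only [List.map_cons, List.foldl_cons, List.any_cons]
    by_cases hkw : PySem.Str.isIn kw t = true
    · simp only [pvStep, hkw, Bool.true_and, if_true, Bool.true_or]
      exact pvAbsorb t _ (i, pt, v) (by
        intro e he
        simp only [List.mem_map] at he
        obtain ⟨kw', _, rfl⟩ := he
        simp)
    · simp only [pvStep, hkw, Bool.false_and, Bool.false_or, reduceIte]
      exact ih

theorem pvMain (t : String) : ∀ (rules : List (List String × String × Int)) (i : Int),
    (match (pvFlatOf i rules).foldl (pvStep t) none with
      | none => (("General Construction", 20000) : String × Int)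
      | some (_, pt, v) => (pt, v)) = pvChainOf t rules := by
  intro rules
  induction rules with
  | nil => intro i; rfl
  | cons r rest ih =>
    intro i
    obtain ⟨kws, pt, v⟩ := r
    simp only [pvFlatOf, List.foldl_append, pvChainOf]
    rw [pvGroupFold]
    by_cases hg : kws.any (fun word => PySem.Str.isIn word t) = true
    · simp only [hg, if_true]
      rw [pvAbsorb t _ (i, pt, v) (fun e he => le_trans (by omega) (pvRanks_ge rest (i + 1) e he))]
    · simp only [hg]
      exact ih (i + 1)

theorem pvA_eq_chain (text : String) :
    analyze_nextdoor_project text = pvChainOf (PySem.Str.lower text) pvGroups := by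
  simp only [analyze_nextdoor_project, pvChainOf, pvGroups]

-- ===== VERDICT =====
theorem analyze_nextdoor_project_spec : Claim_equal_analyze_nextdoor_project := by
  intro text _
  unfold Spec_analyze_nextdoor_project analyze_nextdoor_project_alt
  rw [pvFlat_eq, pvMain (PySem.Str.lower text) pvGroups 0, ← pvA_eq_chain]
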